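-- pv_equiv track=rewrite | github.com/Marco-Mello/artigo_01 | codigo_Artigo/funcoes_decodificador.py | aplicar_substitucoes_por_bloco
-- ===== SOURCE A (Python) =====
-- def aplicar_substitucoes_por_bloco(blocos, flat, top_words, bloco_index=0, apply_scope='block', used_top_words=None):
--     """
--     Gera mapeamentos usando APENAS as palavras do bloco `bloco_index`
--     e aplica as substituições conforme `apply_scope`.
--     Retorna (palavras_substituidas_pos, mapa)
--     """
--     if not isinstance(top_words, dict):
--         raise TypeError("top_words deve ser um dict palavra->rank")
--
--     if used_top_words is None:
--         used_top_words = set()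
--
--     if bloco_index < 0 or bloco_index >= len(blocos):
--         return flat.copy(), {}
--
--     top_sorted = sorted(top_words.items(), key=lambda item: item[1])
--
--     mapa = {}
--     letras_usadas = set()
--
--     def primeira_candidata_por_tamanho_disponivel(tamanho):
--         for w, _rank in top_sorted:
--             if len(w) == tamanho and w not in used_top_words:
--                 return w
--         return None
--
--     bloco = blocos[bloco_index]
--     for pos, palavra in bloco:
--         if palavra.islower():
--             continue
--
--         candidata = primeira_candidata_por_tamanho_disponivel(len(palavra))
--         if not candidata:
--             continue
--
--         for c_cifrado, c_claro in zip(palavra, candidata):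
--             c_claro_lower = c_claro.lower()
--             if c_cifrado.islower():
--                 continue
--             if c_cifrado in mapa and mapa[c_cifrado] != c_claro_lower:
--                 continue
--             if c_claro_lower in letras_usadas:
--                 continue
--             mapa[c_cifrado] = c_claro_lower
--             letras_usadas.add(c_claro_lower)
--         used_top_words.add(candidata)
--
--     pos_to_word = {pos: pw for pos, pw in flat}
--     if apply_scope == 'block':
--         pos_targets = {pos for pos, _ in bloco}
--     else:
--         pos_targets = set(pos_to_word.keys())
--
--     for pos in pos_targets:
--         palavra = pos_to_word.get(pos, "")
--         if not palavra:
--             continue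
--         nova = "".join(mapa.get(ch, ch) for ch in palavra)
--         pos_to_word[pos] = nova
--
--     palavras_substituidas_pos = [(pos, pos_to_word.get(pos, "")) for pos, _ in flat]
--     return palavras_substituidas_pos, mapa
-- ===== SOURCE B (Python) =====
-- def aplicar_substitucoes_por_bloco(blocos, flat, top_words, bloco_index=0, apply_scope='block', used_top_words=None):
--     """Same result as the original, restructured into four independent stages:
--     (1) rank-sorted candidates are grouped by length into queues once; (2) a
--     single pass over the block pops each word's candidate and flattens all
--     (cipher,clear) character pairs into ONE stream; (3) one fold over that
--     stream builds the letter map (no per-word inner/outer nesting); (4) the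
--     output is one comprehension over flat, whose per-position word comes from
--     a reverse-scan 'first occurrence wins' dict instead of a forward
--     overwrite dict plus an update pass.  Also adds chosen candidates to the
--     caller's used_top_words set in place, like the original."""
--     if not isinstance(top_words, dict):
--         raise TypeError("top_words deve ser um dict palavra->rank")
--     if used_top_words is None:
--         used_top_words = set()
--     if not (0 <= bloco_index < len(blocos)):
--         return list(flat), {}
--
--     # stage 1: still-available candidates grouped by length, rank order kept
--     queues = {}
--     for w, _rank in sorted(top_words.items(), key=lambda kv: kv[1]):
--         if w not in used_top_words:
--             queues.setdefault(len(w), []).append(w)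
--
--     # stage 2: pick one candidate per eligible block word, flatten char pairs
--     bloco = blocos[bloco_index]
--     pairs = []
--     for _pos, palavra in bloco:
--         if palavra.islower():
--             continue
--         q = queues.get(len(palavra))
--         if not q or not q[0]:
--             continue
--         cand = q.pop(0)
--         pairs.extend(zip(palavra, cand))
--         used_top_words.add(cand)
--
--     # stage 3: one fold over the flattened pair stream builds the map
--     mapa = {}
--     usados = set()
--     for c, p in pairs:
--         low = p.lower()
--         if c.islower() or low in usados or mapa.get(c, low) != low:
--             continue
--         mapa[c] = low
--         usados.add(low)
--
--     # stage 4: last word per position via a reverse scan, then one comprehension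
--     ultimo = {}
--     for pos, w in reversed(flat):
--         if pos not in ultimo:
--             ultimo[pos] = w
--     bloco_pos = {pos for pos, _ in bloco}
--     tr = lambda w: "".join(mapa.get(ch, ch) for ch in w)
--     out = [(pos,
--             tr(ultimo[pos]) if (apply_scope != 'block' or pos in bloco_pos)
--             else ultimo[pos])
--            for pos, _ in flat]
--     return out, mapa
-- ===== Notes on version B (the rewrite author's own statement) =====
-- stated objective: alternative
-- what changed: B is a staged pipeline: candidates are grouped by length into rank-ordered queues once, the block pass only pops queue heads and flattens all (cipher,clear) character pairs into one stream, a single fold over that stream builds the letter map (no nested per-word loop), and the output comes from one comprehension over flat backed by a reverse-scan first-occurrence dict instead of A's forward dict plus an in-place update pass over a position set.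
import Mathlib
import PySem

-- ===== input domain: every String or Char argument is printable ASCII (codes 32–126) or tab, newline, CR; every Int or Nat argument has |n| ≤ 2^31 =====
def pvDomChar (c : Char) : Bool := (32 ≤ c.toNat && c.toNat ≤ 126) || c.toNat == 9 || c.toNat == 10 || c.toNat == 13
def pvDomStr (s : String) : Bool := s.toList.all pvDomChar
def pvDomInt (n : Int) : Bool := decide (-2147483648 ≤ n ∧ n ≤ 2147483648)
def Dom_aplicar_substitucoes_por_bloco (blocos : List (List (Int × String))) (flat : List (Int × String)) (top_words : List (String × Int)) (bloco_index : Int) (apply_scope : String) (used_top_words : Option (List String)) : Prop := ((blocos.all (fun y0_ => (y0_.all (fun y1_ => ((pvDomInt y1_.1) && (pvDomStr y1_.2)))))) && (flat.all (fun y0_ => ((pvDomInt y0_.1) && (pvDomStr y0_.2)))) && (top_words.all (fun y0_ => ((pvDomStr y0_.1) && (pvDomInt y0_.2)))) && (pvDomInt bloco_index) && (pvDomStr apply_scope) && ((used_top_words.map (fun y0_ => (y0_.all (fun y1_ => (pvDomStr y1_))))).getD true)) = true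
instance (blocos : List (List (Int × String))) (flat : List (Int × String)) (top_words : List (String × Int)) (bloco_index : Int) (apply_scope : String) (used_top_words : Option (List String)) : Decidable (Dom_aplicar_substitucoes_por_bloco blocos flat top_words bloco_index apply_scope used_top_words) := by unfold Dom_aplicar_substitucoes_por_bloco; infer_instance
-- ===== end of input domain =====

-- B is a staged pipeline: length-grouped candidate queues built once, one flattened
-- (cipher,clear) pair stream, a single fold building the letter map, and the output read off
-- `flat` through a reverse-scan first-occurrence dict.  Equivalence is about the return value
-- only: both Pythons also add the chosen candidates to the caller's `used_top_words` set in place.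

-- ===== PORT A =====

-- str.islower() on the ASCII domain: at least one cased (= letter) char and no uppercase one
def pvStrIslower (s : String) : Bool :=
  s.toList.any PySem.Chars.islower && !(s.toList.any PySem.Chars.isupper)

-- primeira_candidata_por_tamanho_disponivel: first top word of the wanted length not yet used
def pvCandA (topSorted : List (String × Int)) (used : PySem.Set String) (tamanho : Int) : Option String :=
  (topSorted.find? (fun p => PySem.Str.len p.1 == tamanho && !(PySem.Set.contains used p.1))).map (·.1)

-- the body of A's inner `for c_cifrado, c_claro in zip(...)` loop (three skip branches)
def pvInnerA (st : PySem.Dict Char Char × PySem.Set Char) (cc : Char × Char) :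
    PySem.Dict Char Char × PySem.Set Char :=
  let low := PySem.Chars.lowerChar cc.2
  if PySem.Chars.islower cc.1 then st
  else if st.1.contains cc.1 && !(st.1.getD cc.1 low == low) then st
  else if PySem.Set.contains st.2 low then st
  else (st.1.insert cc.1 low, PySem.Set.add st.2 low)

-- the body of A's `for pos, palavra in bloco` loop; state = (mapa, letras_usadas, used_top_words)
def pvWordA (topSorted : List (String × Int))
    (st : PySem.Dict Char Char × PySem.Set Char × PySem.Set String) (pw : Int × String) :
    PySem.Dict Char Char × PySem.Set Char × PySem.Set String :=
  if pvStrIslower pw.2 then st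
  else
    match pvCandA topSorted st.2.2 (PySem.Str.len pw.2) with
    | none => st
    | some cand =>
      if cand == "" then st   -- `if not candidata` also skips the empty string
      else
        let ml := (pw.2.toList.zip cand.toList).foldl pvInnerA (st.1, st.2.1)
        (ml.1, ml.2, PySem.Set.add st.2.2 cand)

-- A's block loop over `bloco`
def pvRunA (topSorted : List (String × Int)) (bloco : List (Int × String))
    (used0 : PySem.Set String) : PySem.Dict Char Char × PySem.Set Char × PySem.Set String :=
  bloco.foldl (pvWordA topSorted) (PySem.Dict.empty, PySem.Set.empty, used0)

-- "".join(mapa.get(ch, ch) for ch in palavra): every piece is one char, so the join is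
-- exactly the String of the mapped char list
def pvSubstA (mapa : PySem.Dict Char Char) (w : String) : String :=
  String.ofList (w.toList.map (fun ch => mapa.getD ch ch))

-- A's application phase: pos_to_word dict, pos_targets set, update pass, then read off flat
-- (the local `palavra` of the update loop is written inline)
def pvApplyA (mapa : PySem.Dict Char Char) (flat bloco : List (Int × String))
    (scope : String) : List (Int × String) :=
  let posToWord := flat.foldl (fun d p => d.insert p.1 p.2) PySem.Dict.empty
  let posTargets : PySem.Set Int :=
    if scope == "block" then PySem.Set.ofList (bloco.map (·.1))
    else PySem.Set.ofList (PySem.Dict.keys posToWord)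
  -- `for pos in pos_targets:` the updates are key-wise independent, so the set's order is immaterial
  let posToWord2 := posTargets.foldl (fun d pos =>
      if d.getD pos "" == "" then d else d.insert pos (pvSubstA mapa (d.getD pos ""))) posToWord
  flat.map (fun p => (p.1, posToWord2.getD p.1 ""))

def aplicar_substitucoes_por_bloco (blocos : List (List (Int × String))) (flat : List (Int × String)) (top_words : List (String × Int)) (bloco_index : Int) (apply_scope : String) (used_top_words : Option (List String)) : (List (Int × String)) × (List (String × String)) :=
  -- `used_top_words = set()` if None, else the given set
  let used0 : PySem.Set String := PySem.Set.ofList (used_top_words.getD [])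
  if bloco_index < 0 || bloco_index ≥ (blocos.length : Int) then (flat, [])
  else
    let topSorted := PySem.List.sorted (PySem.Dict.ofList top_words).items (fun p => p.2) false
    let bloco := (PySem.List.pyGet? blocos bloco_index).getD []   -- index checked in range above
    let mapa := (pvRunA topSorted bloco used0).1
    (pvApplyA mapa flat bloco apply_scope,
     mapa.items.map (fun p => (String.ofList [p.1], String.ofList [p.2])))

-- ===== PORT B =====

-- stage 1: still-available candidates grouped by length (setdefault+append), rank order kept
def pvQueues (topSorted : List (String × Int)) (used : PySem.Set String) :
    PySem.Dict Int (List String) :=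
  topSorted.foldl (fun d p =>
      if !(PySem.Set.contains used p.1)
      then d.modify (PySem.Str.len p.1) [] (fun q => q ++ [p.1]) else d) PySem.Dict.empty

-- stage 2: pick each eligible block word's candidate (pop the queue head) and flatten
-- all (cipher, clear) character pairs into one stream
def pvPick (queues : PySem.Dict Int (List String)) : List (Int × String) → List (Char × Char)
  | [] => []
  | pw :: rest =>
    if pvStrIslower pw.2 then pvPick queues rest
    else
      match queues.getD (PySem.Str.len pw.2) [] with
      | [] => pvPick queues rest
      | cand :: q =>
        if cand == "" then pvPick queues rest
        else pw.2.toList.zip cand.toList ++ pvPick (queues.insert (PySem.Str.len pw.2) q) rest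

-- stage 3: one fold over the flattened pair stream builds the map (combined skip condition)
def pvBuildMapa : List (Char × Char) → PySem.Dict Char Char → PySem.Set Char → PySem.Dict Char Char
  | [], mapa, _ => mapa
  | cp :: rest, mapa, usados =>
    let low := PySem.Chars.lowerChar cp.2
    if PySem.Chars.islower cp.1 || PySem.Set.contains usados low || !(mapa.getD cp.1 low == low)
    then pvBuildMapa rest mapa usados
    else pvBuildMapa rest (mapa.insert cp.1 low) (PySem.Set.add usados low)

-- stage 4: last word per position via a reverse scan keeping the FIRST occurrence seen
def pvUltimo (flat : List (Int × String)) : PySem.Dict Int String :=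
  flat.reverse.foldl (fun d p => if d.contains p.1 then d else d.insert p.1 p.2) PySem.Dict.empty

-- tr: map each char through mapa (the `ultimo[pos]` lookup in Source B never misses: pos ∈ flat)
def pvTr (mapa : PySem.Dict Char Char) : List Char → List Char
  | [] => []
  | c :: cs => mapa.getD c c :: pvTr mapa cs

def aplicar_substitucoes_por_bloco_alt (blocos : List (List (Int × String))) (flat : List (Int × String)) (top_words : List (String × Int)) (bloco_index : Int) (apply_scope : String) (used_top_words : Option (List String)) : (List (Int × String)) × (List (String × String)) :=
  let used : PySem.Set String := PySem.Set.ofList (used_top_words.getD [])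
  if 0 ≤ bloco_index && bloco_index < (blocos.length : Int) then
    let bloco := (PySem.List.pyGet? blocos bloco_index).getD []
    let ranked := PySem.List.sorted (PySem.Dict.ofList top_words).items (fun kv => kv.2) false
    let mapa := pvBuildMapa (pvPick (pvQueues ranked used) bloco) PySem.Dict.empty PySem.Set.empty
    let ultimo := pvUltimo flat
    let blocoPos : PySem.Set Int := PySem.Set.ofList (bloco.map (·.1))
    (flat.map (fun p => (p.1,
        if !(apply_scope == "block") || PySem.Set.contains blocoPos p.1
        then String.ofList (pvTr mapa (ultimo.getD p.1 "").toList)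
        else ultimo.getD p.1 "")),
     mapa.items.map (fun kv => (String.ofList [kv.1], String.ofList [kv.2])))
  else (flat, [])

-- ===== PRECONDITION & SPEC =====
def Spec_aplicar_substitucoes_por_bloco (blocos : List (List (Int × String))) (flat : List (Int × String)) (top_words : List (String × Int)) (bloco_index : Int) (apply_scope : String) (used_top_words : Option (List String)) (out : (List (Int × String)) × (List (String × String))) : Prop := out = aplicar_substitucoes_por_bloco_alt blocos flat top_words bloco_index apply_scope used_top_words
instance (blocos : List (List (Int × String))) (flat : List (Int × String)) (top_words : List (String × Int)) (bloco_index : Int) (apply_scope : String) (used_top_words : Option (List String)) (out : (List (Int × String)) × (List (String × String))) : Decidable (Spec_aplicar_substitucoes_por_bloco blocos flat top_words bloco_index apply_scope used_top_words out) := by unfold Spec_aplicar_substitucoes_por_bloco; infer_instance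

-- ===== CLAIM (what is proved, stated in full; the proofs are below) =====
def Claim_equal_aplicar_substitucoes_por_bloco : Prop := ∀ (blocos : List (List (Int × String))) (flat : List (Int × String)) (top_words : List (String × Int)) (bloco_index : Int) (apply_scope : String) (used_top_words : Option (List String)), Dom_aplicar_substitucoes_por_bloco blocos flat top_words bloco_index apply_scope used_top_words → Spec_aplicar_substitucoes_por_bloco blocos flat top_words bloco_index apply_scope used_top_words (aplicar_substitucoes_por_bloco blocos flat top_words bloco_index apply_scope used_top_words)

-- ===== LEMMAS AND PROOFS =====

-- the rank-ordered words of length l still available given the current used set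
def pvAvail (ws : List String) (used : PySem.Set String) (l : Int) : List String :=
  ws.filter (fun w => PySem.Str.len w == l && !(PySem.Set.contains used w))

theorem pvCandA_eq_head (ts : List (String × Int)) (used : PySem.Set String) (l : Int) :
    pvCandA ts used l = (pvAvail (ts.map (·.1)) used l).head? := by
  unfold pvCandA pvAvail
  rw [List.filter_map, List.head?_map, List.head?_filter]
  rfl

theorem pvContains_add (used : PySem.Set String) (w x : String) :
    PySem.Set.contains (PySem.Set.add used w) x = (x == w || PySem.Set.contains used x) := by
  simp only [PySem.Set.contains]
  by_cases h : x = w <;> simp [PySem.Set.mem_add, h]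

theorem pvAvail_add (ws : List String) (used : PySem.Set String) (w : String) (l : Int) :
    pvAvail ws (PySem.Set.add used w) l = (pvAvail ws used l).filter (fun x => !(x == w)) := by
  unfold pvAvail
  rw [List.filter_filter]
  apply List.filter_congr
  intro x _
  rw [pvContains_add]
  cases h1 : (PySem.Str.len x == l) <;> cases h2 : (x == w) <;>
    cases h3 : PySem.Set.contains used x <;> simp [h1, h2, h3]

theorem pvMem_avail_len {ws : List String} {used : PySem.Set String} {l : Int} {w : String}
    (h : w ∈ pvAvail ws used l) : PySem.Str.len w = l := by
  unfold pvAvail at h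
  have := List.of_mem_filter h
  simp at this
  exact this.1

theorem pvAvail_add_self {ws : List String} (hnd : ws.Nodup) {used : PySem.Set String}
    {l : Int} {w : String} {rest : List String}
    (h : pvAvail ws used l = w :: rest) : pvAvail ws (PySem.Set.add used w) l = rest := by
  have hnd' : (pvAvail ws used l).Nodup := List.Nodup.filter _ hnd
  rw [h] at hnd'
  have hw : w ∉ rest := (List.nodup_cons.mp hnd').1
  rw [pvAvail_add, h, List.filter_cons]
  have hww : (!(w == w)) = false := by simp
  rw [hww]
  simp only [Bool.false_eq_true, if_false]
  apply List.filter_eq_self.mpr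
  intro x hx
  simp only [Bool.not_eq_eq_eq_not, Bool.not_true, beq_eq_false_iff_ne]
  exact fun he => hw (he ▸ hx)

theorem pvAvail_add_other {ws : List String} {used : PySem.Set String}
    {l l' : Int} {w : String} {rest : List String} (hne : l' ≠ l)
    (h : pvAvail ws used l = w :: rest) :
    pvAvail ws (PySem.Set.add used w) l' = pvAvail ws used l' := by
  have hwl : PySem.Str.len w = l := pvMem_avail_len (by rw [h]; exact List.mem_cons_self)
  rw [pvAvail_add]
  apply List.filter_eq_self.mpr
  intro x hx
  have hxl : PySem.Str.len x = l' := pvMem_avail_len hx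
  simp only [Bool.not_eq_eq_eq_not, Bool.not_true, beq_eq_false_iff_ne]
  intro he
  exact hne (by rw [← hxl, he, hwl])

-- B's single combined skip condition performs exactly A's inner-loop step
theorem pvBuild_step (st : PySem.Dict Char Char × PySem.Set Char) (cc : Char × Char) :
    pvInnerA st cc =
      (if PySem.Chars.islower cc.1 || PySem.Set.contains st.2 (PySem.Chars.lowerChar cc.2)
          || !(st.1.getD cc.1 (PySem.Chars.lowerChar cc.2) == PySem.Chars.lowerChar cc.2)
       then st
       else (st.1.insert cc.1 (PySem.Chars.lowerChar cc.2),
             PySem.Set.add st.2 (PySem.Chars.lowerChar cc.2))) := by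
  unfold pvInnerA
  by_cases h1 : PySem.Chars.islower cc.1 = true
  · simp [h1]
  · by_cases hc : st.1.contains cc.1 = true
    · by_cases hv : (st.1.getD cc.1 (PySem.Chars.lowerChar cc.2) == PySem.Chars.lowerChar cc.2) = true
      · simp [h1, hc, hv]
      · simp [h1, hc, hv]
    · have hg : st.1.getD cc.1 (PySem.Chars.lowerChar cc.2) = PySem.Chars.lowerChar cc.2 :=
        PySem.Dict.getD_of_not_contains _ _ (by simpa using hc)
      simp [h1, hc, hg]

-- B's stage-3 fold over the pair stream is A's inner loop run on the concatenation
theorem pvBuild_eq_foldl (ps : List (Char × Char)) :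
    ∀ (mapa : PySem.Dict Char Char) (usados : PySem.Set Char),
      pvBuildMapa ps mapa usados = (ps.foldl pvInnerA (mapa, usados)).1 := by
  induction ps with
  | nil => intro mapa usados; rfl
  | cons cp rest ih =>
    intro mapa usados
    rw [List.foldl_cons, pvBuild_step (mapa, usados) cp]
    unfold pvBuildMapa
    by_cases h : (PySem.Chars.islower cp.1 || PySem.Set.contains usados (PySem.Chars.lowerChar cp.2)
        || !(mapa.getD cp.1 (PySem.Chars.lowerChar cp.2) == PySem.Chars.lowerChar cp.2)) = true
    · simp only [h, if_true]; exact ih mapa usados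
    · simp only [h, Bool.false_eq_true, if_false]; exact ih _ _

-- relation: A's block loop from state sa equals A's inner loop run on B's flattened pair
-- stream, provided the queues describe exactly the words still available under sa's used set
theorem pvRun_pairs (ts : List (String × Int)) (hnd : (ts.map (·.1)).Nodup)
    (bloco : List (Int × String)) :
    ∀ (sa : PySem.Dict Char Char × PySem.Set Char × PySem.Set String)
      (qb : PySem.Dict Int (List String)),
      (∀ l, qb.getD l [] = pvAvail (ts.map (·.1)) sa.2.2 l) →
      ((bloco.foldl (pvWordA ts) sa).1, (bloco.foldl (pvWordA ts) sa).2.1)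
        = (pvPick qb bloco).foldl pvInnerA (sa.1, sa.2.1) := by
  induction bloco with
  | nil => intro sa qb _; rfl
  | cons pw rest ih =>
    intro sa qb hq
    rw [List.foldl_cons]
    unfold pvPick pvWordA
    by_cases hl : pvStrIslower pw.2 = true
    · simp only [hl, if_true]; exact ih sa qb hq
    · simp only [hl, Bool.false_eq_true, if_false]
      rw [pvCandA_eq_head, hq (PySem.Str.len pw.2)]
      cases hA : pvAvail (ts.map (·.1)) sa.2.2 (PySem.Str.len pw.2) with
      | nil => exact ih sa qb hq
      | cons w q =>
        simp only [List.head?_cons]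
        by_cases hw : (w == "") = true
        · simp only [hw, if_true]; exact ih sa qb hq
        · simp only [hw, Bool.false_eq_true, if_false]
          rw [List.foldl_append]
          have hq' : ∀ l, (qb.insert (PySem.Str.len pw.2) q).getD l []
              = pvAvail (ts.map (·.1)) (PySem.Set.add sa.2.2 w) l := by
            intro l
            rw [PySem.Dict.getD_insert]
            by_cases hll : l = PySem.Str.len pw.2
            · subst hll
              simp only [if_pos rfl]
              exact (pvAvail_add_self hnd hA).symm
            · simp only [if_neg hll]
              rw [hq l, pvAvail_add_other hll hA]
          have := ih ((( pw.2.toList.zip w.toList).foldl pvInnerA (sa.1, sa.2.1)).1,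
              ((pw.2.toList.zip w.toList).foldl pvInnerA (sa.1, sa.2.1)).2,
              PySem.Set.add sa.2.2 w) (qb.insert (PySem.Str.len pw.2) q) hq'
          exact this

-- initial queues = availability at the initial used set (generalized accumulator)
theorem pvQueues_init_gen (used0 : PySem.Set String) (ts : List (String × Int)) :
    ∀ (d : PySem.Dict Int (List String)) (l : Int),
      (ts.foldl (fun d p =>
          if !(PySem.Set.contains used0 p.1)
          then d.modify (PySem.Str.len p.1) [] (fun q => q ++ [p.1]) else d) d).getD l []
      = d.getD l [] ++ pvAvail (ts.map (·.1)) used0 l := by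
  induction ts with
  | nil => intro d l; simp [pvAvail]
  | cons p ts ih =>
    intro d l
    rw [List.foldl_cons]
    by_cases hu : PySem.Set.contains used0 p.1 = true
    · simp only [hu, Bool.not_true, Bool.false_eq_true, if_false]
      rw [ih d l]
      have hm : p.1 ∈ used0 := by simpa [PySem.Set.contains] using hu
      unfold pvAvail
      simp [List.filter_cons, hm]
    · have hu' : PySem.Set.contains used0 p.1 = false := by simpa using hu
      have hm : p.1 ∉ used0 := by simpa [PySem.Set.contains] using hu'
      simp only [hu', Bool.not_false, if_true]
      rw [ih _ l]
      unfold pvAvail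
      rw [List.map_cons, List.filter_cons]
      rw [PySem.Dict.getD_modify]
      by_cases hl : (PySem.Str.len p.1 == l) = true
      · have hl2 : ((p.1.length : Int)) = l := by simpa [PySem.Str.len] using hl
        subst hl2
        simp [PySem.Str.len, hm, List.append_assoc]
      · have hl2 : ¬((p.1.length : Int) = l) := by simpa [PySem.Str.len] using hl
        have hl3 : ¬(l = (p.1.length : Int)) := fun h => hl2 h.symm
        simp [PySem.Str.len, hm, hl2, hl3]

-- the two mapa computations coincide
theorem pvMapa_eq (ts : List (String × Int)) (hnd : (ts.map (·.1)).Nodup)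
    (bloco : List (Int × String)) (used0 : PySem.Set String) :
    pvBuildMapa (pvPick (pvQueues ts used0) bloco) PySem.Dict.empty PySem.Set.empty
      = (pvRunA ts bloco used0).1 := by
  rw [pvBuild_eq_foldl]
  have hq : ∀ l, (pvQueues ts used0).getD l [] = pvAvail (ts.map (·.1)) used0 l := by
    intro l
    unfold pvQueues
    rw [pvQueues_init_gen used0 ts PySem.Dict.empty l]
    simp
  have h := pvRun_pairs ts hnd bloco (PySem.Dict.empty, PySem.Set.empty, used0)
    (pvQueues ts used0) hq
  exact (congrArg Prod.fst h).symm

-- forward insert-overwrite dict, read back: the LAST binding wins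
theorem pvFold_insert_getD (l : List (Int × String)) :
    ∀ (d : PySem.Dict Int String) (q : Int) (v : String),
      (l.foldl (fun d p => d.insert p.1 p.2) d).getD q v
        = match l.reverse.find? (fun p => p.1 == q) with
          | some r => r.2
          | none => d.getD q v := by
  induction l with
  | nil => intro d q v; rfl
  | cons p l ih =>
    intro d q v
    rw [List.foldl_cons, ih, List.reverse_cons, List.find?_append]
    cases hf : l.reverse.find? (fun p => p.1 == q) with
    | some r => simp [hf]
    | none =>
      simp only [hf]
      by_cases hpq : (p.1 == q) = true
      · have hq' : q = p.1 := (beq_iff_eq.mp hpq).symm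
        simp [List.find?, hpq, PySem.Dict.getD_insert, hq']
      · have hq' : ¬(q = p.1) := fun h => hpq (beq_iff_eq.mpr h.symm)
        simp [List.find?, hpq, PySem.Dict.getD_insert, hq']

-- reverse-scan keep-first dict, read back: the FIRST binding of the scanned list wins
theorem pvFold_keep_getD (l : List (Int × String)) :
    ∀ (d : PySem.Dict Int String) (q : Int) (v : String),
      (l.foldl (fun d p => if d.contains p.1 then d else d.insert p.1 p.2) d).getD q v
        = if d.contains q then d.getD q v
          else match l.find? (fun p => p.1 == q) with
               | some r => r.2
               | none => v := by
  induction l with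
  | nil =>
    intro d q v
    by_cases h : d.contains q = true
    · simp [h]
    · simp [h, PySem.Dict.getD_of_not_contains _ _ (by simpa using h : PySem.Dict.contains d q = false)]
  | cons p l ih =>
    intro d q v
    rw [List.foldl_cons]
    by_cases hp : d.contains p.1 = true
    · simp only [hp, if_true]
      rw [ih]
      by_cases hq : d.contains q = true
      · simp [hq]
      · have hpq : (p.1 == q) = false := by
          rcases hb : (p.1 == q) with _ | _
          · rfl
          · exact absurd (beq_iff_eq.mp hb ▸ hp) (by simpa using hq)
        simp [hq, List.find?, hpq]
    · simp only [hp, Bool.false_eq_true, if_false]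
      rw [ih]
      by_cases hqp : q = p.1
      · subst hqp
        have hc : (d.insert p.1 p.2).contains p.1 = true :=
          PySem.Dict.contains_insert_self d p.1 p.2
        simp [hc, hp, PySem.Dict.getD_insert, List.find?]
      · have hc : (d.insert p.1 p.2).contains q = d.contains q := by
          rw [PySem.Dict.contains_insert]
          have : (q == p.1) = false := beq_eq_false_iff_ne.mpr hqp
          simp [this]
        have hgd : (d.insert p.1 p.2).getD q v = d.getD q v := by
          rw [PySem.Dict.getD_insert]; simp [hqp]
        have hpq : (p.1 == q) = false := beq_eq_false_iff_ne.mpr (fun h => hqp h.symm)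
        rw [hc, hgd]
        by_cases hq : d.contains q = true
        · simp [hq]
        · simp [hq, List.find?, hpq]

-- both per-position dicts agree on every lookup
theorem pvUltimo_getD (flat : List (Int × String)) (q : Int) (v : String) :
    (pvUltimo flat).getD q v
      = (flat.foldl (fun d p => d.insert p.1 p.2) PySem.Dict.empty).getD q v := by
  unfold pvUltimo
  rw [pvFold_keep_getD, pvFold_insert_getD]
  simp

theorem pvTr_eq_map (mapa : PySem.Dict Char Char) (cs : List Char) :
    pvTr mapa cs = cs.map (fun c => mapa.getD c c) := by
  induction cs with
  | nil => rfl
  | cons c cs ih => unfold pvTr; rw [ih, List.map_cons]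

-- the per-position update loop of A, read back key-wise
theorem pvUpdate_fold (f : String → String) (ts : List Int) (hnd : ts.Nodup) :
    ∀ (d : PySem.Dict Int String) (q : Int),
      (ts.foldl (fun d pos =>
          if d.getD pos "" == "" then d else d.insert pos (f (d.getD pos ""))) d).getD q ""
      = if q ∈ ts ∧ ¬(d.getD q "" = "") then f (d.getD q "") else d.getD q "" := by
  induction ts with
  | nil => intro d q; simp
  | cons pos ts ih =>
    intro d q
    have hnd' := List.nodup_cons.mp hnd
    rw [List.foldl_cons, ih hnd'.2]
    by_cases hq : q = pos
    · subst hq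
      have hqts : q ∉ ts := hnd'.1
      by_cases hz : d.getD q "" = ""
      · simp [hz, hqts]
      · simp only [beq_iff_eq, hz, Bool.false_eq_true, if_false, PySem.Dict.getD_insert]
        simp [hqts, hz]
    · have harg : (if d.getD pos "" == "" then d
          else d.insert pos (f (d.getD pos ""))).getD q "" = d.getD q "" := by
        by_cases hz : d.getD pos "" = ""
        · simp [hz]
        · simp only [beq_iff_eq, hz, Bool.false_eq_true, if_false, PySem.Dict.getD_insert]
          simp [hq]
      rw [harg]
      by_cases hmem : q ∈ ts <;> simp [hmem, hq]

theorem pvMem_keys_fold (flat : List (Int × String)) (p : Int × String) (hp : p ∈ flat) :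
    p.1 ∈ (flat.foldl (fun d q => d.insert q.1 q.2) (PySem.Dict.empty : PySem.Dict Int String)).keys := by
  rw [PySem.Dict.keys_foldl_insert_key flat (fun q => q.1) (fun _ q => q.2)]
  have hm : p.1 ∈ flat.map (·.1) := List.mem_map_of_mem hp
  have he : PySem.Set.update (PySem.Dict.empty : PySem.Dict Int String).keys (flat.map (·.1))
      = PySem.Set.ofList (flat.map (·.1)) := rfl
  rw [he, PySem.Set.mem_ofList]
  exact hm

theorem pvContains_eq_decide_mem {α : Type} [BEq α] [LawfulBEq α] (s : PySem.Set α) (x : α) :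
    PySem.Set.contains s x = decide (x ∈ s) := by
  simp [PySem.Set.contains]

-- A's application phase equals B's single comprehension over flat
theorem pvApply_eq (mapa : PySem.Dict Char Char) (flat bloco : List (Int × String))
    (scope : String) :
    pvApplyA mapa flat bloco scope
      = flat.map (fun p => (p.1,
          if !(scope == "block") || PySem.Set.contains (PySem.Set.ofList (bloco.map (·.1))) p.1
          then String.ofList (pvTr mapa ((pvUltimo flat).getD p.1 "").toList)
          else (pvUltimo flat).getD p.1 "")) := by
  simp only [pvApplyA]
  apply List.map_congr_left
  intro p hp
  refine Prod.ext rfl ?_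
  have hsub : ∀ w : String, String.ofList (pvTr mapa w.toList) = pvSubstA mapa w := by
    intro w; rw [pvTr_eq_map]; rfl
  by_cases hsc : (scope == "block") = true
  · simp only [hsc, if_true, Bool.not_true, Bool.false_or]
    rw [pvUpdate_fold (pvSubstA mapa) _ (PySem.Set.nodup_ofList _)]
    rw [pvContains_eq_decide_mem, pvUltimo_getD]
    by_cases hmem : p.1 ∈ PySem.Set.ofList (bloco.map (·.1))
    · by_cases hz : (flat.foldl (fun d p => d.insert p.1 p.2) PySem.Dict.empty).getD p.1 "" = ""
      · simp [hmem, hz, pvTr]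
      · simp [hmem, hz, hsub]
    · simp [hmem]
  · simp only [hsc, Bool.false_eq_true, if_false, Bool.not_false, Bool.true_or, if_true]
    rw [pvUpdate_fold (pvSubstA mapa) _ (PySem.Set.nodup_ofList _), pvUltimo_getD]
    have hmem : p.1 ∈ PySem.Set.ofList
        (PySem.Dict.keys (flat.foldl (fun d p => d.insert p.1 p.2) PySem.Dict.empty)) := by
      rw [PySem.Set.mem_ofList]
      exact pvMem_keys_fold flat p hp
    by_cases hz : (flat.foldl (fun d p => d.insert p.1 p.2) PySem.Dict.empty).getD p.1 "" = ""
    · simp [hmem, hz, pvTr]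
    · simp [hmem, hz, hsub]

theorem pvNodup_topwords (top_words : List (String × Int)) :
    ((PySem.List.sorted (PySem.Dict.ofList top_words).items (fun p => p.2) false).map (·.1)).Nodup := by
  have hperm : (PySem.List.sorted (PySem.Dict.ofList top_words).items (fun p => p.2) false).Perm
      (PySem.Dict.ofList top_words).items := PySem.List.sorted_perm _ _ _
  have hkeys : ((PySem.Dict.ofList top_words).items.map (·.1)).Nodup :=
    PySem.Dict.nodup_keys_ofList top_words
  exact (hperm.map (·.1)).nodup_iff.mpr hkeys

-- ===== VERDICT (by name: the statement is the Claim_ definition above) =====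
theorem aplicar_substitucoes_por_bloco_spec : Claim_equal_aplicar_substitucoes_por_bloco := by
  intro blocos flat top_words bloco_index apply_scope used_top_words _
  unfold Spec_aplicar_substitucoes_por_bloco
  unfold aplicar_substitucoes_por_bloco aplicar_substitucoes_por_bloco_alt
  by_cases h0 : bloco_index < 0
  · have hb : ¬(0 ≤ bloco_index) := by omega
    simp [h0, hb]
  · by_cases h1 : bloco_index < (blocos.length : Int)
    · rw [if_neg, if_pos]
      · simp only [pvMapa_eq (PySem.List.sorted (PySem.Dict.ofList top_words).items
            (fun p => p.2) false) (pvNodup_topwords top_words), pvApply_eq]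
      · simp only [Bool.and_eq_true, decide_eq_true_eq]
        omega
      · simp only [Bool.or_eq_true, decide_eq_true_eq, ge_iff_le]
        omega
    · have hA : (bloco_index < 0 ∨ (blocos.length : Int) ≤ bloco_index) := by omega
      have hB : ¬(0 ≤ bloco_index ∧ bloco_index < (blocos.length : Int)) := by omega
      simp [hA, hB]
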